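-- pv_equiv track=rewrite | github.com/kbassuday/NLP | tokenizedCorpusStats.py | nr_hapax_words
-- ===== SOURCE A (Python) =====
-- def nr_hapax_words(corpus):
--     '''Returns number of hapax words'''
--     freqs = {key: 0 for key in corpus}
--     hapax_list = []
--     for word in corpus:
--         freqs[word] += 1
--     for word in freqs:
--         if freqs[word] == 1:
--             hapax_list.append(word)
--     return len(hapax_list)
-- ===== SOURCE B (Python) =====
-- def nr_hapax_words(corpus):
--     '''Returns number of hapax words'''
--     items = sorted(corpus)
--     n = len(items)
--     count = 0
--     i = 0
--     while i < n:
--         j = i + 1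
--         while j < n and items[j] == items[i]:
--             j += 1
--         if j - i == 1:
--             count += 1
--         i = j
--     return count
-- ===== Notes on version B (the rewrite author's own statement) =====
-- stated objective: alternative
-- what changed: Replaces the frequency dictionary plus key scan by sort-then-group: sort the corpus and make one pass over maximal runs of equal words, counting runs of length 1.
import Mathlib
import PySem

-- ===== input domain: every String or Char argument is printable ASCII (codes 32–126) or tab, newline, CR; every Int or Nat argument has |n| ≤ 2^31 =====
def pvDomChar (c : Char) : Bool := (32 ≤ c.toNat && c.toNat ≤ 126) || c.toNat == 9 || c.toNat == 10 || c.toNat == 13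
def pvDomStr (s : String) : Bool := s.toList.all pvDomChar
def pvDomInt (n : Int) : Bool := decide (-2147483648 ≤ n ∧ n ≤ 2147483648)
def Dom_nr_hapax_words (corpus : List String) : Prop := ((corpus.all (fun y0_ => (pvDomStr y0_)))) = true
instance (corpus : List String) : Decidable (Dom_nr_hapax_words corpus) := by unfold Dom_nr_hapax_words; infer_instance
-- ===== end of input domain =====

-- B replaces A's frequency dictionary + key scan by sort-then-group runs (alternative algorithm, same results).


-- ===== PORT A =====
def nr_hapax_words (corpus : List String) : Int :=
  -- freqs = {key: 0 for key in corpus}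
  let freqs0 : PySem.Dict String Int := corpus.foldl (fun d key => d.insert key 0) PySem.Dict.empty
  -- for word in corpus: freqs[word] += 1
  let freqs := corpus.foldl (fun d word => d.modify word 0 (· + 1)) freqs0
  -- for word in freqs: if freqs[word] == 1: hapax_list.append(word)
  let hapax_list := freqs.keys.foldl (fun acc word => if freqs.getD word 0 == 1 then acc ++ [word] else acc) []
  (hapax_list.length : Int)

-- ===== PORT B =====
-- Source B's outer while over the sorted list, recursing on the suffix that starts each run:
-- the inner while advancing j over elements equal to items[i] is takeWhile/dropWhile of the
-- suffix after the run's head, and 'j - i == 1' is 'that run remainder is empty'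
def pvRuns : List String → Int → Int
  | [], count => count
  | head :: t, count =>
    let run := t.takeWhile (fun x => x == head)
    pvRuns (t.dropWhile (fun x => x == head)) (if run.length = 0 then count + 1 else count)
termination_by l _ => l.length
decreasing_by
  simp only [List.length_cons]
  exact Nat.lt_succ_of_le (List.length_dropWhile_le _ _)

def nr_hapax_words_alt (corpus : List String) : Int :=
  pvRuns (PySem.List.sorted corpus (fun x => x) false) 0

-- ===== PRECONDITION & SPEC =====
def Spec_nr_hapax_words (corpus : List String) (out : Int) : Prop := out = nr_hapax_words_alt corpus
instance (corpus : List String) (out : Int) : Decidable (Spec_nr_hapax_words corpus out) := by unfold Spec_nr_hapax_words; infer_instance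

-- ===== CLAIM (what is proved, stated in full; the proofs are below) =====
def Claim_equal_nr_hapax_words : Prop := ∀ (corpus : List String), Dom_nr_hapax_words corpus → Spec_nr_hapax_words corpus (nr_hapax_words corpus)

-- ===== LEMMAS AND PROOFS =====

-- both sides compute: the number of distinct words of l whose multiplicity in l is 1
def hapaxSpec (l : List String) : Nat :=
  (PySem.List.dedup l).countP (fun w => l.count w == 1)

-- the dict comprehension initialises every lookup to 0
lemma getD_fold_insert_zero (l : List String) (d : PySem.Dict String Int) (w : String)
    (h : d.getD w 0 = 0) : (l.foldl (fun d key => d.insert key 0) d).getD w 0 = 0 := by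
  induction l generalizing d with
  | nil => simpa using h
  | cons a t ih =>
    simp only [List.foldl_cons]
    apply ih
    by_cases hw : w = a
    · subst hw; simp [PySem.Dict.getD_insert_self]
    · rw [PySem.Dict.getD_insert_of_ne _ _ _ hw]; exact h

lemma A_eq (corpus : List String) : nr_hapax_words corpus = (hapaxSpec corpus : Int) := by
  simp only [nr_hapax_words]
  set freqs0 := corpus.foldl (fun (d : PySem.Dict String Int) key => d.insert key 0) PySem.Dict.empty with hf0
  set freqs := corpus.foldl (fun (d : PySem.Dict String Int) word => d.modify word 0 (· + 1)) freqs0 with hf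
  have hget : ∀ w, freqs.getD w 0 = (corpus.count w : Int) := by
    intro w
    rw [hf, PySem.Dict.getD_foldl_modify_add_one, hf0,
      getD_fold_insert_zero _ _ _ (by simp [PySem.Dict.getD, PySem.Dict.get?, PySem.Dict.empty]), zero_add]
  have hkeys : freqs.keys = PySem.List.dedup corpus := by
    rw [hf, PySem.Dict.keys_foldl_modify, hf0, PySem.Dict.keys_foldl_insert, PySem.Dict.keys_empty,
      PySem.Set.update_nil_left, PySem.Set.update_eq_append_filter]
    have hnil : List.filter (fun y => !(PySem.Set.ofList corpus).contains y) (PySem.Set.ofList corpus) = [] := by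
      apply List.filter_eq_nil_iff.2
      intro a ha
      simp [ha]
    rw [hnil]
    simp [PySem.List.dedup_eq_ofList]
  rw [PySem.List.foldl_append_if (fun word => freqs.getD word 0 == 1) (fun w => w), hkeys]
  simp only [List.nil_append, List.map_id_fun', id_eq]
  norm_cast
  rw [← List.countP_eq_length_filter]
  unfold hapaxSpec
  apply List.countP_congr
  intro w _
  simp [hget, Nat.cast_eq_one]

lemma head_not_mem_dropWhile (head : String) (t : List String)
    (h1 : ∀ x ∈ t, head ≤ x) (h2 : t.Pairwise (· ≤ ·)) :
    head ∉ t.dropWhile (fun x => x == head) := by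
  intro hmem
  cases hrest : t.dropWhile (fun x => x == head) with
  | nil => rw [hrest] at hmem; simp at hmem
  | cons d r' =>
    rw [hrest] at hmem
    have hd : (d == head) = false := by
      have h := List.head?_dropWhile_not (fun x => x == head) t
      rw [hrest] at h
      simpa using h
    have hdne : d ≠ head := by simpa using hd
    have hdt : d ∈ t := (List.dropWhile_sublist _).subset (by rw [hrest]; exact List.mem_cons_self ..)
    have hpw : (d :: r').Pairwise (· ≤ ·) := hrest ▸ h2.sublist (List.dropWhile_sublist _)
    rcases List.mem_cons.1 hmem with h | h
    · exact hdne h.symm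
    · exact hdne (le_antisymm ((List.pairwise_cons.1 hpw).1 head h) (h1 d hdt))

lemma runs_eq : ∀ (l : List String) (acc : Int), l.Pairwise (· ≤ ·) →
    pvRuns l acc = acc + (hapaxSpec l : Int) := by
  intro l acc
  induction l, acc using pvRuns.induct with
  | case1 acc => intro _; simp [pvRuns, hapaxSpec]
  | case2 head t acc run ih =>
    intro hs
    simp only [dite_eq_ite] at ih
    obtain ⟨h1, h2⟩ := List.pairwise_cons.1 hs
    have hnotmem : head ∉ t.dropWhile (fun x => x == head) := head_not_mem_dropWhile head t h1 h2
    have hrest_pw : (t.dropWhile (fun x => x == head)).Pairwise (· ≤ ·) :=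
      h2.sublist (List.dropWhile_sublist _)
    have hrun : ∀ x ∈ t.takeWhile (fun x => x == head), x = head := by
      intro x hx
      simpa using List.mem_takeWhile_imp hx
    have hsplit : t.takeWhile (fun x => x == head) ++ t.dropWhile (fun x => x == head) = t :=
      List.takeWhile_append_dropWhile
    -- multiplicity facts
    have hcount_t : t.count head = (t.takeWhile (fun x => x == head)).length := by
      conv_lhs => rw [← hsplit]
      rw [List.count_append, List.count_eq_length.2 (fun b hb => (hrun b hb).symm),
        List.count_eq_zero.2 hnotmem, Nat.add_zero]
    have hcount_head : (head :: t).count head = (t.takeWhile (fun x => x == head)).length + 1 := by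
      rw [List.count_cons_self, hcount_t]
    have hcount_ne : ∀ w ∈ t.dropWhile (fun x => x == head),
        (head :: t).count w = (t.dropWhile (fun x => x == head)).count w := by
      intro w hw
      have hwne : w ≠ head := fun he => hnotmem (he ▸ hw)
      have hwrun : w ∉ t.takeWhile (fun x => x == head) := fun hc => hwne (hrun w hc)
      have ht : t.count w = (t.dropWhile (fun x => x == head)).count w := by
        conv_lhs => rw [← hsplit]
        rw [List.count_append, List.count_eq_zero.2 hwrun, Nat.zero_add]
      simp [List.count_cons, ht]
      exact fun h => hwne h.symm
    -- dedup of the whole list is head followed by dedup of the remainder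
    have hmemt : ∀ a : String, a ∈ t ↔
        a ∈ t.takeWhile (fun x => x == head) ∨ a ∈ t.dropWhile (fun x => x == head) := by
      intro a
      conv_lhs => rw [← hsplit]
      exact List.mem_append
    have hperm : (PySem.List.dedup (head :: t)).Perm
        (head :: PySem.List.dedup (t.dropWhile (fun x => x == head))) := by
      apply (List.perm_ext_iff_of_nodup (PySem.List.nodup_dedup _) ?_).2
      · intro a
        simp only [PySem.List.mem_dedup, List.mem_cons, hmemt a]
        constructor
        · rintro (rfl | hr | hr)
          · exact Or.inl rfl
          · exact Or.inl (hrun a hr)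
          · exact Or.inr hr
        · rintro (rfl | hr)
          · exact Or.inl rfl
          · exact Or.inr (Or.inr hr)
      · apply List.nodup_cons.2
        refine ⟨fun hc => hnotmem ?_, PySem.List.nodup_dedup _⟩
        simpa [PySem.List.mem_dedup] using hc
    have hspec : hapaxSpec (head :: t) =
        hapaxSpec (t.dropWhile (fun x => x == head)) +
          (if (t.takeWhile (fun x => x == head)).length = 0 then 1 else 0) := by
      unfold hapaxSpec
      rw [List.Perm.countP_eq _ hperm, List.countP_cons]
      have e1 : List.countP (fun w => (head :: t).count w == 1)
          (PySem.List.dedup (t.dropWhile (fun x => x == head))) =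
          List.countP (fun w => (t.dropWhile (fun x => x == head)).count w == 1)
            (PySem.List.dedup (t.dropWhile (fun x => x == head))) := by
        apply List.countP_congr
        intro w hw
        rw [hcount_ne w (by simpa [PySem.List.mem_dedup] using hw)]
      have e2 : (if ((head :: t).count head == 1) = true then 1 else 0) =
          (if (t.takeWhile (fun x => x == head)).length = 0 then 1 else 0) := by
        rw [hcount_head]
        rcases Nat.eq_zero_or_pos (t.takeWhile (fun x => x == head)).length with h0 | h0
        · simp [h0]
        · simp [beq_iff_eq, h0.ne']
      rw [e1, e2]
    rw [pvRuns, ih hrest_pw, hspec]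
    push_cast
    split_ifs <;> ring

lemma B_eq (corpus : List String) : nr_hapax_words_alt corpus = (hapaxSpec corpus : Int) := by
  unfold nr_hapax_words_alt
  rw [runs_eq _ _ (PySem.List.sorted_pairwise corpus (fun x => x)), zero_add]
  have hperm := PySem.List.sorted_perm corpus (fun x => x) false
  have hd : (PySem.List.dedup (PySem.List.sorted corpus (fun x => x) false)).Perm
      (PySem.List.dedup corpus) := by
    apply (List.perm_ext_iff_of_nodup (PySem.List.nodup_dedup _) (PySem.List.nodup_dedup _)).2
    intro a
    simp [hperm.mem_iff]
  unfold hapaxSpec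
  congr 1
  rw [List.Perm.countP_eq _ hd]
  apply List.countP_congr
  intro w _
  rw [hperm.count_eq]

-- ===== VERDICT (by name: the statement is the Claim_ definition above) =====
theorem nr_hapax_words_spec : Claim_equal_nr_hapax_words := by
  intro corpus _
  unfold Spec_nr_hapax_words
  rw [A_eq, B_eq]
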